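-- pv_equiv track=rewrite | github.com/hdsung98/ps | 투포인터,이진탐색,정렬,누적합/네이버 코테2.py | find_largest_group
-- ===== SOURCE A (Python) =====
-- def find_largest_group(A, B, delays):
--     n, m = len(delays), len(delays[0])  # 멤버 수 n, 서버 수 m
--     max_group_size = 0
--     server_with_max_group = -1
--
--     for server in range(m):
--         # 현재 서버에 대한 딜레이 값을 가리키는 인덱스를 저장
--         indices = list(range(n))
--         # 인덱스를 딜레이 값에 따라 오름차순으로 정렬
--         indices.sort(key=lambda x: delays[x][server])
--
--         start, end = 0, 0  # 투 포인터 초기화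
--
--         while end < n:
--             min_delay = delays[indices[start]][server]
--             max_delay = delays[indices[end]][server]
--
--             if max_delay <= min_delay * A and max_delay - min_delay <= B:
--                 # 형평성 규칙을 만족하면, 그룹 크기 증가
--                 current_group_size = end - start + 1
--                 if current_group_size > max_group_size:
--                     max_group_size = current_group_size
--                     server_with_max_group = server
--                 end += 1
--             else:
--                 # 형평성 규칙을 만족하지 않으면, 시작 포인터 이동
--                 start += 1
--
--     return [server_with_max_group, max_group_size]
-- ===== SOURCE B (Python) =====
-- def find_largest_group(A, B, delays):
--     n, m = len(delays), len(delays[0])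
--     best_size = 0
--     best_server = -1
--
--     for server in range(m):
--         # sorted column of delays for this server
--         col = sorted(row[server] for row in delays)
--         for s in range(n):
--             mn = col[s]
--             limit = min(mn * A, mn + B)
--             # hand-rolled bisect_right(col, limit): first index with col[idx] > limit
--             lo, hi = 0, n
--             while lo < hi:
--                 mid = (lo + hi) // 2
--                 if col[mid] <= limit:
--                     lo = mid + 1
--                 else:
--                     hi = mid
--             size = lo - s
--             if size > best_size:
--                 best_size = size
--                 best_server = server
--
--     return [best_server, best_size]
-- ===== Notes on version B (the rewrite author's own statement) =====
-- stated objective: alternative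
-- what changed: A's per-server linear two-pointer sweep over key-sorted indices is replaced by sorting each delay column and, for every start position, locating the furthest fair member with a hand-rolled bisect_right binary search against the combined threshold min(mn*A, mn+B).
import Mathlib
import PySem

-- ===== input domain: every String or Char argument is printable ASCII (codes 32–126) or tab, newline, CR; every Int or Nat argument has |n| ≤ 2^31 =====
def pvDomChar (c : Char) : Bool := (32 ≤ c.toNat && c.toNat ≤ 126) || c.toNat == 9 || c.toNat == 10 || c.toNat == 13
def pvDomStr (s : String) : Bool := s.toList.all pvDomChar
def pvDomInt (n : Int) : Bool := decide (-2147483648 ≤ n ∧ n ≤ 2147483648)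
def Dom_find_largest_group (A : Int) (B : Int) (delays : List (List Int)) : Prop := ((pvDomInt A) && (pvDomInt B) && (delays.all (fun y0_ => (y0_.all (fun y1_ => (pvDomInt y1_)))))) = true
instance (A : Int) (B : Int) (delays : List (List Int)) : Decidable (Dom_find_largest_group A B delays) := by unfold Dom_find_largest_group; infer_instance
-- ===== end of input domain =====

-- B replaces A's linear two-pointer sweep per server by a per-start binary search over the
-- sorted delay column: a different algorithm of similar cost (objective 'alternative').

-- ===== PORT A =====

-- delays[i][j]; where Python would raise IndexError, pyGetD's default is returned — such inputs are outside Pre_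
def pvDget (delays : List (List Int)) (i : Int) (j : Int) : Int :=
  PySem.List.pyGetD (PySem.List.pyGetD delays i []) j 0

-- A's `while end < n` loop; state (start, end, (server_with_max_group, max_group_size)).
-- The `s < n` guard marks where Python raises IndexError on indices[start] (outside Pre_).
def pvAWhile (A : Int) (B : Int) (delays : List (List Int)) (server : Int) (indices : List Int)
    (n s e : Nat) (p : Int × Int) : Int × Int :=
  if he : e < n then
    if hs : s < n then
      let mn := pvDget delays (PySem.List.pyGetD indices (s : Int) 0) server
      let mx := pvDget delays (PySem.List.pyGetD indices (e : Int) 0) server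
      if mx ≤ mn * A ∧ mx - mn ≤ B then
        let c : Int := (e : Int) - (s : Int) + 1
        pvAWhile A B delays server indices n s (e + 1) (if c > p.2 then (server, c) else p)
      else
        pvAWhile A B delays server indices n (s + 1) e p
    else p
  else p
termination_by (n - s) + (n - e)
decreasing_by all_goals omega

def find_largest_group (A : Int) (B : Int) (delays : List (List Int)) : List Int :=
  let n := delays.length
  let m := (delays.headD []).length   -- delays[0]; Python raises on empty delays (outside Pre_)
  let r := (PySem.List.pyRange 0 (m : Int) 1).foldl (fun p server =>
      let indices := PySem.List.sorted (PySem.List.pyRange 0 (n : Int) 1)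
        (fun x => pvDget delays x server) false
      pvAWhile A B delays server indices n 0 0 p) (-1, 0)
  [r.1, r.2]

-- ===== PORT B =====

-- Source B's hand-rolled bisect_right loop: first index in [lo, hi) with col[idx] > limit
def pvBisect (col : List Int) (limit : Int) (lo hi : Nat) : Nat :=
  if h : lo < hi then
    let mid := (lo + hi) / 2    -- (lo+hi)//2 on nonnegative ints
    if PySem.List.pyGetD col (mid : Int) 0 ≤ limit then pvBisect col limit (mid + 1) hi
    else pvBisect col limit lo mid
  else lo
termination_by hi - lo
decreasing_by all_goals omega

def find_largest_group_alt (A : Int) (B : Int) (delays : List (List Int)) : List Int :=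
  let n := delays.length
  let m := (delays.headD []).length   -- delays[0]; Python raises on empty delays (outside Pre_)
  let r := (PySem.List.pyRange 0 (m : Int) 1).foldl (fun p server =>
      let col := PySem.List.sorted (delays.map (fun row => PySem.List.pyGetD row server 0))
        (fun x => x) false
      (PySem.List.pyRange 0 (n : Int) 1).foldl (fun q s =>
        let mn := PySem.List.pyGetD col s 0
        let limit := min (mn * A) (mn + B)
        let size := ((pvBisect col limit 0 n : Nat) : Int) - s
        if size > q.2 then (server, size) else q) p) (-1, 0)
  [r.1, r.2]

-- ===== PRECONDITION & SPEC =====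

-- Pre_ is exactly the set of inputs on which Python A returns (it raises IndexError elsewhere):
-- delays nonempty, no row shorter than the first row, and in every server column some pivot entry
-- v satisfies u ≤ v*A and u ≤ v+B for all entries u of that column (the two-pointer start index
-- overruns the index list and raises exactly when a column has no such pivot).
def Pre_find_largest_group (A : Int) (B : Int) (delays : List (List Int)) : Prop :=
  delays ≠ [] ∧
  (∀ row ∈ delays, (delays.headD []).length ≤ row.length) ∧
  (∀ j : Nat, j < (delays.headD []).length →
    ∃ piv ∈ delays, ∀ row ∈ delays,
      row.getD j 0 ≤ piv.getD j 0 * A ∧ row.getD j 0 ≤ piv.getD j 0 + B)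

instance (A : Int) (B : Int) (delays : List (List Int)) : Decidable (Pre_find_largest_group A B delays) := by
  unfold Pre_find_largest_group; infer_instance

def pvWitness_find_largest_group : Int × Int × List (List Int) := (2, 3, [[1, 2], [4, 1], [2, 2]])

def Spec_find_largest_group (A : Int) (B : Int) (delays : List (List Int)) (out : List Int) : Prop := out = find_largest_group_alt A B delays
instance (A : Int) (B : Int) (delays : List (List Int)) (out : List Int) : Decidable (Spec_find_largest_group A B delays out) := by unfold Spec_find_largest_group; infer_instance

-- ===== CLAIM (what is proved, stated in full; the proofs are below) =====
def Claim_equal_find_largest_group : Prop := ∀ (A : Int) (B : Int) (delays : List (List Int)), Dom_find_largest_group A B delays → Pre_find_largest_group A B delays → Spec_find_largest_group A B delays (find_largest_group A B delays)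


-- ===== LEMMAS AND PROOFS =====

-- the strict-improvement update both programs perform on a candidate group size
def pvG (server : Int) (q : Int × Int) (c : Int) : Int × Int :=
  if c > q.2 then (server, c) else q

-- number of elements of col that are ≤ T
def pvCnt (col : List Int) (T : Int) : Nat := col.countP (fun x => decide (x ≤ T))

-- the fairness threshold for a group whose minimum delay is x
def pvLim (A B x : Int) : Int := min (x * A) (x + B)

lemma pvG_absorb (server : Int) (q : Int × Int) (c d : Int) (h : c ≤ d) :
    pvG server (pvG server q c) d = pvG server q d := by
  unfold pvG; split_ifs <;> simp_all <;> omega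

lemma pvG_eq_self (server : Int) (q : Int × Int) (c : Int) (h : c ≤ q.2) :
    pvG server q c = q := by
  unfold pvG; rw [if_neg (by omega)]

lemma pvFoldG_id (server : Int) (f : Nat → Int) :
    ∀ (l : List Nat) (p : Int × Int), (∀ x ∈ l, f x ≤ p.2) →
      l.foldl (fun q k => pvG server q (f k)) p = p := by
  intro l
  induction l with
  | nil => intro p _; rfl
  | cons x t ih =>
      intro p h
      simp only [List.foldl_cons, pvG_eq_self server p (f x) (h x (by simp))]
      exact ih p (fun y hy => h y (by simp [hy]))

lemma pvFoldG_snd_mono (server : Int) (f : Nat → Int) :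
    ∀ (l : List Nat) (p : Int × Int), p.2 ≤ (l.foldl (fun q k => pvG server q (f k)) p).2 := by
  intro l
  induction l with
  | nil => intro p; exact le_refl _
  | cons x t ih =>
      intro p
      simp only [List.foldl_cons]
      refine le_trans ?_ (ih _)
      unfold pvG; split_ifs with h
      · exact le_of_lt h
      · exact le_refl _

-- fold congruence along an invariant on the accumulator
lemma pvFoldlInv {α σ : Type} (P : σ → Prop) (f g : σ → α → σ) :
    ∀ (l : List α) (s : σ), P s →
      (∀ s' a, a ∈ l → P s' → f s' a = g s' a ∧ P (f s' a)) →
      l.foldl f s = l.foldl g s := by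
  intro l
  induction l with
  | nil => intro s _ _; rfl
  | cons x t ih =>
      intro s hP h
      have hx := h s x (by simp) hP
      simp only [List.foldl_cons, hx.1]
      exact ih (g s x) (hx.1 ▸ hx.2) (fun s' a ha hP' => h s' a (by simp [ha]) hP')

-- on a ≤-sorted list, the elements ≤ T are exactly the first pvCnt of them
lemma pvSortedCount (T : Int) :
    ∀ (col : List Int), col.Pairwise (· ≤ ·) →
      ∀ i : Nat, i < col.length → (col.getD i 0 ≤ T ↔ i < pvCnt col T) := by
  intro col
  induction col with
  | nil => intro _ i hi; simp at hi
  | cons c tl ih =>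
      intro hp i hi
      have hhead : ∀ y ∈ tl, c ≤ y := (List.pairwise_cons.mp hp).1
      have htl : tl.Pairwise (· ≤ ·) := (List.pairwise_cons.mp hp).2
      unfold pvCnt
      rw [List.countP_cons]
      by_cases hc : c ≤ T
      · simp only [hc, decide_true, if_true]
        cases i with
        | zero => simp [hc]
        | succ j =>
            have hj : j < tl.length := by simpa using hi
            have h2 := ih htl j hj
            unfold pvCnt at h2
            simp only [List.getD_cons_succ]
            rw [h2]
            omega
      · have htl0 : tl.countP (fun x => decide (x ≤ T)) = 0 := by
          rw [List.countP_eq_zero]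
          intro y hy
          simp only [decide_eq_true_eq]
          intro hyT
          exact hc (le_trans (hhead y hy) hyT)
        have hzero : (List.countP (fun x => decide (x ≤ T)) tl + if decide (c ≤ T) = true then 1 else 0) = 0 := by
          simp [hc, htl0]
        rw [htl0] at hzero ⊢
        cases i with
        | zero => simp [hc]
        | succ j =>
            have hj : j < tl.length := by simpa using hi
            simp only [List.getD_cons_succ]
            constructor
            · intro h
              exfalso
              have hm : tl.getD j 0 ∈ tl := by
                rw [List.getD_eq_getElem tl 0 hj]
                exact List.getElem_mem hj
              exact hc (le_trans (hhead _ hm) h)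
            · intro h; rw [hzero] at h; exact absurd h (by omega)

lemma pvSortedGetDMono (col : List Int) (h : col.Pairwise (· ≤ ·)) (i j : Nat)
    (hij : i ≤ j) (hj : j < col.length) : col.getD i 0 ≤ col.getD j 0 := by
  rcases Nat.lt_or_ge i j with hlt | hge
  · rw [List.getD_eq_getElem col 0 (lt_trans hlt hj), List.getD_eq_getElem col 0 hj]
    exact List.pairwise_iff_getElem.mp h i j (lt_trans hlt hj) hj hlt
  · have : i = j := le_antisymm hij hge
    subst this; rfl

-- Source B's binary search finds exactly the number of elements ≤ T
lemma pvBisectEq (col : List Int) (T : Int) (hsort : col.Pairwise (· ≤ ·)) :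
    ∀ lo hi, lo ≤ hi → hi ≤ col.length →
      (∀ i, i < lo → col.getD i 0 ≤ T) →
      (∀ i, hi ≤ i → i < col.length → ¬ col.getD i 0 ≤ T) →
      pvBisect col T lo hi = pvCnt col T := by
  intro lo hi
  induction hlohi : hi - lo using Nat.strong_induction_on generalizing lo hi with
  | _ d ih =>
    intro hle hhi hlow hhigh
    rw [pvBisect]
    by_cases h : lo < hi
    · simp only [h, dif_pos]
      have hmid2 : (lo + hi) / 2 < hi := by omega
      have hmidlen : (lo + hi) / 2 < col.length := lt_of_lt_of_le hmid2 hhi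
      rw [PySem.List.pyGetD_natCast]
      by_cases hc : col.getD ((lo + hi) / 2) 0 ≤ T
      · simp only [hc, if_pos]
        exact ih (hi - ((lo + hi) / 2 + 1)) (by omega) _ _ rfl (by omega) hhi
          (fun i hi' => le_trans (pvSortedGetDMono col hsort i _ (by omega) hmidlen) hc)
          hhigh
      · simp only [hc, ite_false]
        exact ih ((lo + hi) / 2 - lo) (by omega) _ _ rfl (by omega) (le_of_lt hmidlen)
          hlow
          (fun i hi1 hi2 hle2 => hc (le_trans (pvSortedGetDMono col hsort _ i hi1 hi2) hle2))
    · rw [dif_neg h]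
      have hcle : pvCnt col T ≤ col.length := List.countP_le_length
      rcases Nat.lt_trichotomy lo (pvCnt col T) with hlt | heq | hgt
      · exfalso
        have hlen : lo < col.length := lt_of_lt_of_le hlt hcle
        have := (pvSortedCount T col hsort lo hlen).mpr hlt
        exact hhigh lo (by omega) hlen this
      · exact heq
      · exfalso
        have hlen : pvCnt col T < col.length := by omega
        have := hlow (pvCnt col T) hgt
        exact absurd ((pvSortedCount T col hsort _ hlen).mp this) (by omega)

-- the core: A's two-pointer sweep computes, start by start, the same strict-improvement fold of
-- per-start best group sizes that B computes by binary search
lemma pvMain (A B : Int) (delays : List (List Int)) (server : Int) (indices : List Int)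
    (n : Nat) (col : List Int)
    (Hlen : col.length = n)
    (Hsort : col.Pairwise (· ≤ ·))
    (Hread : ∀ i : Nat, i < n → pvDget delays (PySem.List.pyGetD indices (i : Int) 0) server = col.getD i 0)
    (s0 : Nat) (Hs0 : s0 < n)
    (Hall : ∀ i : Nat, i < n → col.getD i 0 ≤ pvLim A B (col.getD s0 0)) :
    ∀ s e : Nat, ∀ p : Int × Int, s ≤ s0 → e ≤ n → (e : Int) - s ≤ p.2 →
      pvAWhile A B delays server indices n s e p
        = (List.range' s (n - s)).foldl
            (fun q k => pvG server q ((pvCnt col (pvLim A B (col.getD k 0)) : Int) - k)) p := by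
  intro s e
  induction hme : (n - s) + (n - e) using Nat.strong_induction_on generalizing s e with
  | _ d ih =>
    intro p hs0le hen hp
    rw [pvAWhile]
    by_cases he : e < n
    · have hs : s < n := by omega
      rw [dif_pos he, dif_pos hs, Hread s hs, Hread e he]
      set mn := col.getD s 0 with hmn
      set mx := col.getD e 0 with hmx
      have hchar := pvSortedCount (pvLim A B mn) col Hsort e (by omega)
      by_cases hcond : mx ≤ mn * A ∧ mx - mn ≤ B
      · rw [if_pos hcond]
        have hlt : e < pvCnt col (pvLim A B mn) := by
          apply hchar.mp
          exact le_min hcond.1 (by omega)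
        have habs : (e : Int) - s + 1 ≤ (pvCnt col (pvLim A B mn) : Int) - s := by omega
        rw [ih ((n - s) + (n - (e+1))) (by omega) s (e+1) rfl _ (by omega) (by omega)
            (by
              show ((e:Int)+1) - s ≤ (if (e:Int) - s + 1 > p.2 then ((server : Int), (e:Int) - s + 1) else p).2
              split_ifs with hgt <;> simp <;> omega)]
        have hns : n - s = (n - s - 1) + 1 := by omega
        rw [hns, List.range'_succ, List.foldl_cons, List.foldl_cons]
        congr 1
        show pvG server (pvG server p ((e:Int) - s + 1)) _ = pvG server p _
        exact pvG_absorb server p _ _ habs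
      · rw [if_neg hcond]
        have hne : s ≠ s0 := by
          intro hh
          have hx := Hall e he
          rw [← hmx, ← hh, ← hmn] at hx
          exact hcond ⟨le_trans hx (min_le_left _ _), by
            have := le_trans hx (min_le_right _ _); omega⟩
        have hcnt : pvCnt col (pvLim A B mn) ≤ e := by
          by_contra hlt
          push Not at hlt
          have : mx ≤ pvLim A B mn := hchar.mpr hlt
          simp only [pvLim, le_min_iff] at this
          exact hcond ⟨this.1, by omega⟩
        rw [ih ((n - (s+1)) + (n - e)) (by omega) (s+1) e rfl _ (by omega) (by omega) (by omega)]
        have hns : n - s = (n - (s+1)) + 1 := by omega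
        rw [hns, List.range'_succ, List.foldl_cons, ← hmn]
        congr 2
        exact (pvG_eq_self server p _ (by omega)).symm
    · rw [dif_neg he]
      refine (pvFoldG_id server _ _ p ?_).symm
      intro k hk
      rw [List.mem_range'_1] at hk
      have hcle : pvCnt col (pvLim A B (col.getD k 0)) ≤ n := by
        rw [← Hlen]; exact List.countP_le_length
      omega

-- ===== VERDICT (by name: the statement is the Claim_ definition above) =====
theorem find_largest_group_spec : Claim_equal_find_largest_group := by
  intro A B delays _ hpre
  obtain ⟨hne, hrect, hpiv⟩ := hpre
  set n := delays.length with hn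
  set m := (delays.headD []).length with hm
  have hfold :
      (PySem.List.pyRange 0 (m : Int) 1).foldl (fun p server =>
        let indices := PySem.List.sorted (PySem.List.pyRange 0 (n : Int) 1)
          (fun x => pvDget delays x server) false
        pvAWhile A B delays server indices n 0 0 p) (-1, 0)
      = (PySem.List.pyRange 0 (m : Int) 1).foldl (fun p server =>
        let col := PySem.List.sorted (delays.map (fun row => PySem.List.pyGetD row server 0))
          (fun x => x) false
        (PySem.List.pyRange 0 (n : Int) 1).foldl (fun q s =>
          let mn := PySem.List.pyGetD col s 0
          let limit := min (mn * A) (mn + B)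
          let size := ((pvBisect col limit 0 n : Nat) : Int) - s
          if size > q.2 then (server, size) else q) p) (-1, 0) := by
    apply pvFoldlInv (fun p => 0 ≤ p.2)
    · norm_num
    · intro p server hmem hP
      -- server is a genuine server index: 0 ≤ server < m, so m > 0 and Pre_'s right disjunct holds
      rw [PySem.List.mem_pyRange_one] at hmem
      set key := fun x => pvDget delays x server with hkey
      set colBase := delays.map (fun row => PySem.List.pyGetD row server 0) with hcolBase
      set indices := PySem.List.sorted (PySem.List.pyRange 0 (n : Int) 1) key false with hindices
      set col := PySem.List.sorted colBase (fun x => x) false with hcolDef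
      have hmapkey : (PySem.List.pyRange 0 (n : Int) 1).map key = colBase := by
        rw [hcolBase, hn]
        conv_rhs => rw [← PySem.List.map_pyGetD_pyRange_zero' delays []]
        rw [List.map_map]
        rfl
      have hcol : col = indices.map key := by
        rw [hcolDef]
        apply PySem.List.sorted_id_eq_of_perm_of_pairwise
        · rw [← hmapkey]
          exact (PySem.List.sorted_perm _ key false).map key
        · exact PySem.List.sorted_map_key_pairwise _ key
      have hindlen : indices.length = n := by
        rw [hindices, PySem.List.length_sorted, PySem.List.length_pyRange_one]
        omega
      have Hlen : col.length = n := by rw [hcol, List.length_map, hindlen]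
      have Hsort : col.Pairwise (· ≤ ·) := by
        rw [hcol]; exact PySem.List.sorted_map_key_pairwise _ key
      have Hread : ∀ i : Nat, i < n →
          pvDget delays (PySem.List.pyGetD indices (i : Int) 0) server = col.getD i 0 := by
        intro i hi
        have hi' : i < indices.length := by omega
        rw [hcol, PySem.List.pyGetD_natCast,
          List.getD_eq_getElem indices 0 hi',
          List.getD_eq_getElem (indices.map key) 0 (by rw [List.length_map]; omega),
          List.getElem_map]
      have hsvn : server = ((server.toNat : Nat) : Int) := by omega
      obtain ⟨piv, hpivmem, hbound⟩ := hpiv server.toNat (by omega)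
      have hvcol : PySem.List.pyGetD piv server 0 ∈ col := by
        rw [hcolDef, PySem.List.mem_sorted, hcolBase, List.mem_map]
        exact ⟨piv, hpivmem, rfl⟩
      obtain ⟨s0, hs0len, hs0val⟩ := List.getElem_of_mem hvcol
      have Hs0 : s0 < n := by omega
      have hcols0 : col.getD s0 0 = piv.getD server.toNat 0 := by
        rw [List.getD_eq_getElem col 0 hs0len, hs0val, hsvn,
          PySem.List.pyGetD_natCast, Int.toNat_natCast]
      have Hall : ∀ i : Nat, i < n → col.getD i 0 ≤ pvLim A B (col.getD s0 0) := by
        intro i hi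
        have hmemcol : col.getD i 0 ∈ col := by
          rw [List.getD_eq_getElem col 0 (by omega)]
          exact List.getElem_mem (by omega)
        rw [hcolDef, PySem.List.mem_sorted, hcolBase, List.mem_map] at hmemcol
        obtain ⟨row, hrow, hval⟩ := hmemcol
        have hxrow : col.getD i 0 = row.getD server.toNat 0 := by
          rw [← hval, hsvn, PySem.List.pyGetD_natCast, Int.toNat_natCast]
        rw [hxrow, hcols0]
        exact le_min (hbound row hrow).1 (hbound row hrow).2
      constructor
      · -- the two per-server bodies agree
        show pvAWhile A B delays server indices n 0 0 p = _
        rw [pvMain A B delays server indices n col Hlen Hsort Hread s0 Hs0 Hall 0 0 p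
          (Nat.zero_le s0) (Nat.zero_le n) (by simpa using hP)]
        -- now rewrite B's fold into the same range' fold
        rw [PySem.List.pyRange_one 0 (n : Int)]
        simp only [Int.sub_zero, Int.toNat_natCast, List.foldl_map, Int.zero_add]
        rw [List.range_eq_range']
        have hnsub : n - 0 = n := by omega
        rw [hnsub]
        apply PySem.List.foldl_congr_mem
        intro q k hk
        rw [List.mem_range'_1] at hk
        have hkn : k < n := by omega
        show pvG server q _ = _
        simp only [pvLim]
        rw [PySem.List.pyGetD_natCast col k 0]
        rw [pvBisectEq col (min (col.getD k 0 * A) (col.getD k 0 + B)) Hsort 0 n (Nat.zero_le n)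
          (by omega) (fun i hi => absurd hi (by omega))
          (fun i hi1 hi2 => absurd (by omega : i < n) (by omega))]
        rfl
      · -- the invariant 0 ≤ p.2 is preserved
        show 0 ≤ (pvAWhile A B delays server indices n 0 0 p).2
        rw [pvMain A B delays server indices n col Hlen Hsort Hread s0 Hs0 Hall 0 0 p
          (Nat.zero_le s0) (Nat.zero_le n) (by simpa using hP)]
        exact le_trans hP (pvFoldG_snd_mono server _ _ p)
  show
      [((PySem.List.pyRange 0 (m : Int) 1).foldl (fun p server =>
        let indices := PySem.List.sorted (PySem.List.pyRange 0 (n : Int) 1)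
          (fun x => pvDget delays x server) false
        pvAWhile A B delays server indices n 0 0 p) (-1, 0)).1,
       ((PySem.List.pyRange 0 (m : Int) 1).foldl (fun p server =>
        let indices := PySem.List.sorted (PySem.List.pyRange 0 (n : Int) 1)
          (fun x => pvDget delays x server) false
        pvAWhile A B delays server indices n 0 0 p) (-1, 0)).2]
    = [((PySem.List.pyRange 0 (m : Int) 1).foldl (fun p server =>
        let col := PySem.List.sorted (delays.map (fun row => PySem.List.pyGetD row server 0))
          (fun x => x) false
        (PySem.List.pyRange 0 (n : Int) 1).foldl (fun q s =>
          let mn := PySem.List.pyGetD col s 0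
          let limit := min (mn * A) (mn + B)
          let size := ((pvBisect col limit 0 n : Nat) : Int) - s
          if size > q.2 then (server, size) else q) p) (-1, 0)).1,
       ((PySem.List.pyRange 0 (m : Int) 1).foldl (fun p server =>
        let col := PySem.List.sorted (delays.map (fun row => PySem.List.pyGetD row server 0))
          (fun x => x) false
        (PySem.List.pyRange 0 (n : Int) 1).foldl (fun q s =>
          let mn := PySem.List.pyGetD col s 0
          let limit := min (mn * A) (mn + B)
          let size := ((pvBisect col limit 0 n : Nat) : Int) - s
          if size > q.2 then (server, size) else q) p) (-1, 0)).2]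
  rw [hfold]
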